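-- pv_equiv track=rewrite | github.com/odri96352/omique2 | time_of_comp.py | position1_2
-- ===== SOURCE A (Python) =====
-- def position1_2 (asc):
--     ind1=[]
--     ind2=[]
--     for k in range(len(asc)-2):  #attention on a peut etre fait de la merde ici, pas sure du -2
--         if k%3==1 :
--             ind1.append(k)
--         if k%3==2:
--             ind2.append(k)
--     return ind1+ind2
-- ===== SOURCE B (Python) =====
-- def position1_2(asc):
--     n = len(asc) - 2
--     return list(range(1, n, 3)) + list(range(2, n, 3))
-- ===== Notes on version B (the rewrite author's own statement) =====
-- stated objective: simpler
-- what changed: Replaces the scan over all indices with two modulo tests per index by direct closed-form generation of the two arithmetic progressions range(1,n,3) and range(2,n,3).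
import Mathlib
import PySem

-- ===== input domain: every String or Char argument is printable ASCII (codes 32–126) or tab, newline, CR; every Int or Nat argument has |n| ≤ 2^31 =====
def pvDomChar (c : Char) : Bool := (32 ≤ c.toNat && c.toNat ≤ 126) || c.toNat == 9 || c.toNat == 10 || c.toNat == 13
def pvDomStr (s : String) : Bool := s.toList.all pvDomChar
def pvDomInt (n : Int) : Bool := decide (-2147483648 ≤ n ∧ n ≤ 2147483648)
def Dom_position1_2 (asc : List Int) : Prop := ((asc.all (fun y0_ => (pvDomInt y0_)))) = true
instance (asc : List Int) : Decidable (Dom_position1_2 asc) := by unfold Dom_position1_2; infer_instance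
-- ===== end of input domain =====

-- B generates the two index progressions directly with stride-3 ranges instead of scanning
-- every index and testing it with modulo: simpler, no branching.

-- ===== PORT A =====
def position1_2 (asc : List Int) : List Int :=
  let p := (PySem.List.pyRange 0 ((asc.length : Int) - 2) 1).foldl
    (fun (st : List Int × List Int) k =>
      let st1 := if PySem.Int.mod k 3 == 1 then (st.1 ++ [k], st.2) else st
      if PySem.Int.mod k 3 == 2 then (st1.1, st1.2 ++ [k]) else st1)
    ([], [])
  p.1 ++ p.2

-- ===== PORT B =====
def position1_2_alt (asc : List Int) : List Int :=
  let n : Int := (asc.length : Int) - 2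
  PySem.List.pyRange 1 n 3 ++ PySem.List.pyRange 2 n 3

-- ===== PRECONDITION & SPEC =====
def Spec_position1_2 (asc : List Int) (out : List Int) : Prop := out = position1_2_alt asc
instance (asc : List Int) (out : List Int) : Decidable (Spec_position1_2 asc out) := by unfold Spec_position1_2; infer_instance

-- ===== CLAIM (what is proved, stated in full; the proofs are below) =====
def Claim_equal_position1_2 : Prop := ∀ (asc : List Int), Dom_position1_2 asc → Spec_position1_2 asc (position1_2 asc)

-- ===== LEMMAS AND PROOFS =====

-- A's loop body, as a named function (definitionally equal to the lambda in the port).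
def pvStep (st : List Int × List Int) (k : Int) : List Int × List Int :=
  let st1 := if PySem.Int.mod k 3 == 1 then (st.1 ++ [k], st.2) else st
  if PySem.Int.mod k 3 == 2 then (st1.1, st1.2 ++ [k]) else st1

-- A's loop accumulates, in each pair component, the corresponding filter of the traversed list.
theorem foldA_eq_filters (l : List Int) (a b : List Int) :
    l.foldl pvStep (a, b)
    = (a ++ l.filter (fun k => PySem.Int.mod k 3 == 1),
       b ++ l.filter (fun k => PySem.Int.mod k 3 == 2)) := by
  induction l generalizing a b with
  | nil => simp
  | cons k t ih =>
    rw [List.foldl_cons]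
    by_cases h1 : (PySem.Int.mod k 3 == 1) = true <;>
      by_cases h2 : (PySem.Int.mod k 3 == 2) = true <;>
      simp only [pvStep, h1, h2, if_true, Bool.false_eq_true, if_false] <;>
      rw [ih] <;> simp only [List.filter_cons, h1, h2, if_true, Bool.false_eq_true, if_false,
        List.append_assoc, List.singleton_append]

theorem pairwise_lt_pyRange_three (r n : Int) :
    (PySem.List.pyRange r n 3).Pairwise (· < ·) := by
  rw [PySem.List.pyRange_of_pos r n (by norm_num : (0:Int) < 3)]
  refine List.Pairwise.map _ (fun i j (h : i < j) => ?_) (List.pairwise_lt_range)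
  have : (i : Int) < (j : Int) := by exact_mod_cast h
  omega

theorem nodup_pyRange_three (r n : Int) :
    (PySem.List.pyRange r n 3).Nodup := by
  rw [PySem.List.pyRange_of_pos r n (by norm_num : (0:Int) < 3)]
  refine List.Nodup.map (fun i j (h : r + 3 * (i:Int) = r + 3 * (j:Int)) => ?_) List.nodup_range
  have : (i : Int) = (j : Int) := by omega
  exact_mod_cast this

-- The filtered full range is exactly the stride-3 range starting at r (for r = 1 or 2).
theorem filter_mod_eq_pyRange (r n : Int) (hr : r = 1 ∨ r = 2) :
    (PySem.List.pyRange 0 n 1).filter (fun k => PySem.Int.mod k 3 == r)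
    = PySem.List.pyRange r n 3 := by
  have hs1 : ((PySem.List.pyRange 0 n 1).filter (fun k => PySem.Int.mod k 3 == r)).Pairwise (· < ·) :=
    (PySem.List.pairwise_lt_pyRange_one 0 n).filter _
  have hs2 := pairwise_lt_pyRange_three r n
  have hnd1 : ((PySem.List.pyRange 0 n 1).filter (fun k => PySem.Int.mod k 3 == r)).Nodup :=
    (PySem.List.nodup_pyRange_one 0 n).filter _
  have hperm : List.Perm
      ((PySem.List.pyRange 0 n 1).filter (fun k => PySem.Int.mod k 3 == r))
      (PySem.List.pyRange r n 3) := by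
    rw [List.perm_ext_iff_of_nodup hnd1 (nodup_pyRange_three r n)]
    intro x
    simp only [List.mem_filter, PySem.List.mem_pyRange_one,
      PySem.List.mem_pyRange_iff_of_pos (by norm_num : (0:Int) < 3), beq_iff_eq,
      PySem.Int.mod, Int.fmod_eq_emod]
    constructor
    · rintro ⟨⟨hx0, hxn⟩, hm⟩
      rcases hr with rfl | rfl <;> exact ⟨by omega, hxn, by omega⟩
    · rintro ⟨hrx, hxn, c, hc⟩
      rcases hr with rfl | rfl <;> exact ⟨⟨by omega, hxn⟩, by omega⟩
  exact List.Perm.eq_of_pairwise (fun a b _ _ h1 h2 => absurd h2 (lt_asymm h1)) hs1 hs2 hperm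

-- ===== VERDICT (by name: the statement is the Claim_ definition above) =====
theorem position1_2_spec : Claim_equal_position1_2 := by
  intro asc _
  show (let p := (PySem.List.pyRange 0 ((asc.length : Int) - 2) 1).foldl pvStep ([], []);
        p.1 ++ p.2) = position1_2_alt asc
  rw [show (PySem.List.pyRange 0 ((asc.length : Int) - 2) 1).foldl pvStep ([], [])
      = _ from foldA_eq_filters _ [] []]
  simp only [List.nil_append]
  rw [filter_mod_eq_pyRange 1 _ (Or.inl rfl), filter_mod_eq_pyRange 2 _ (Or.inr rfl)]
  rfl
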